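-- pv_equiv track=rewrite | github.com/eminddmr/dokum_kayit_web | main.py | analiz_et_kalip_matrisi
-- ===== SOURCE A (Python) =====
-- def analiz_et_kalip_matrisi(dizi):
--     values = dizi.split(",")
--     toplam = 42
--     aktifler = []
--     for idx in range(toplam):
--         try:
--             if values[idx] == "1":
--                 aktifler.append(idx)
--         except IndexError:
--             break  # Veri eksik gelirse döngüyü bitir
--     basarisizlar = [i for i in range(toplam) if i not in aktifler]
--     oran = f"{len(aktifler)}/{toplam}"
--     koordinatlar = []
--     for i in basarisizlar:
--         satir = i // 7 + 1
--         sutun = chr(ord("A") + i % 7)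
--         koordinatlar.append(f"{satir}{sutun}")
--     return oran, ", ".join(koordinatlar)
-- ===== SOURCE B (Python) =====
-- def analiz_et_kalip_matrisi(dizi):
--     # Single pass over the 42 cells: count actives, collect failed coordinates.
--     values = dizi.split(",")
--     count = 0
--     koordinatlar = []
--     for i in range(42):
--         if i < len(values) and values[i] == "1":
--             count += 1
--         else:
--             koordinatlar.append(f"{i // 7 + 1}{chr(ord('A') + i % 7)}")
--     return f"{count}/42", ", ".join(koordinatlar)
-- ===== Notes on version B (the rewrite author's own statement) =====
-- stated objective: simpler
-- what changed: Replaced A's three passes (try/except collection of active indices, a membership-test list comprehension for failures, then a coordinate loop) with one pass over range(42) keeping a running active count and the failed-coordinate strings directly.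
import Mathlib
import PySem

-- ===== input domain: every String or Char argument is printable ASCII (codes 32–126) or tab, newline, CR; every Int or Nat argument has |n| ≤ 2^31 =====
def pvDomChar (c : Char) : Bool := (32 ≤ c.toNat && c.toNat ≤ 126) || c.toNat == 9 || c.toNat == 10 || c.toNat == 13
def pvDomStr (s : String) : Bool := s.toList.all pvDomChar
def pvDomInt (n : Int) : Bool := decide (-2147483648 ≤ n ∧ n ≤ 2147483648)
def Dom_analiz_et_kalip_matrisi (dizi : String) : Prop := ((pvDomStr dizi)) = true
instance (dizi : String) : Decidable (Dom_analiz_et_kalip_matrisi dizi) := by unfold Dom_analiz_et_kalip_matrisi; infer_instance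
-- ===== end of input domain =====

-- B replaces A's three passes (break-on-IndexError collection, membership-filter, coordinate loop)
-- with ONE pass over the 42 cells keeping a running active count and the failed coordinates (objective: simpler).


-- ===== PORT A =====
-- f"{satir}{sutun}" with satir an int and sutun = chr(ord('A') + i % 7) (exact on these nonneg ints)
def pvCoord (i : Int) : String :=
  PySem.Int.toStr (PySem.Int.floordiv i 7 + 1) ++
    String.singleton (Char.ofNat (65 + (PySem.Int.mod i 7).toNat))

-- the 'for idx in range(toplam)' loop with try/except IndexError: break
def pvALoop (values : List String) : List Int → List Int → List Int
  | [], aktifler => aktifler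
  | idx :: rest, aktifler =>
    match PySem.List.pyGet? values idx with
    | none => aktifler  -- IndexError: break
    | some v => pvALoop values rest (if v == "1" then aktifler ++ [idx] else aktifler)

def analiz_et_kalip_matrisi (dizi : String) : String × String :=
  let values := (PySem.Str.split? dizi ",").getD []  -- sep "," is nonempty, so split? is always some
  let toplam : Int := 42
  let aktifler := pvALoop values (PySem.List.pyRange 0 toplam 1) []
  let basarisizlar := (PySem.List.pyRange 0 toplam 1).filter (fun i => !(aktifler.contains i))
  let oran := PySem.Int.toStr (aktifler.length : Int) ++ "/" ++ PySem.Int.toStr toplam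
  let koordinatlar := basarisizlar.map (fun i => pvCoord i)
  (oran, PySem.Str.join ", " koordinatlar)

-- ===== PORT B =====
-- single pass: running active count and failed-coordinate strings
def pvBLoop (values : List String) : List Int → Int → List String → Int × List String
  | [], count, koordinatlar => (count, koordinatlar)
  | i :: rest, count, koordinatlar =>
    if (decide (i < (values.length : Int)) && (PySem.List.pyGet? values i == some "1")) then
      pvBLoop values rest (count + 1) koordinatlar
    else
      pvBLoop values rest count (koordinatlar ++ [pvCoord i])

def analiz_et_kalip_matrisi_alt (dizi : String) : String × String :=
  let values := (PySem.Str.split? dizi ",").getD []  -- sep "," is nonempty, so split? is always some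
  let r := pvBLoop values (PySem.List.pyRange 0 42 1) 0 []
  (PySem.Int.toStr r.1 ++ "/42", PySem.Str.join ", " r.2)

-- ===== PRECONDITION & SPEC =====
def Spec_analiz_et_kalip_matrisi (dizi : String) (out : String × String) : Prop := out = analiz_et_kalip_matrisi_alt dizi
instance (dizi : String) (out : String × String) : Decidable (Spec_analiz_et_kalip_matrisi dizi out) := by unfold Spec_analiz_et_kalip_matrisi; infer_instance

-- ===== CLAIM (what is proved, stated in full; the proofs are below) =====
def Claim_equal_analiz_et_kalip_matrisi : Prop := ∀ (dizi : String), Dom_analiz_et_kalip_matrisi dizi → Spec_analiz_et_kalip_matrisi dizi (analiz_et_kalip_matrisi dizi)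

-- ===== LEMMAS AND PROOFS =====

-- the predicate both loops decide for an index i: cell i is active
def pvQ (values : List String) (i : Int) : Bool :=
  decide (i < (values.length : Int)) && (PySem.List.pyGet? values i == some "1")

lemma pvQ_false_of_ge (values : List String) (i : Int) (h : (values.length : Int) ≤ i) :
    pvQ values i = false := by
  simp [pvQ]; omega

lemma pvALoop_eq (values : List String) :
    ∀ (idxs : List Int) (acc : List Int), idxs.Pairwise (· ≤ ·) → (∀ i ∈ idxs, 0 ≤ i) →
      pvALoop values idxs acc = acc ++ idxs.filter (pvQ values) := by
  intro idxs
  induction idxs with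
  | nil => intro acc _ _; simp [pvALoop]
  | cons i rest ih =>
    intro acc hpw hnn
    have hi : 0 ≤ i := hnn i (by simp)
    have hpw' := List.pairwise_cons.mp hpw
    rw [pvALoop]
    rcases hg : PySem.List.pyGet? values i with _ | v
    · -- IndexError: i out of range, so i ≥ len and every later index fails pvQ too
      have hge : (values.length : Int) ≤ i := by
        have := (PySem.List.pyGet?_eq_none_iff (xs := values) (i := i)).mp hg
        simp [PySem.Raise.InRange] at this
        omega
      have hnil : List.filter (pvQ values) (i :: rest) = [] := by
        apply List.filter_eq_nil_iff.mpr
        intro j hj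
        rcases List.mem_cons.mp hj with h | h
        · subst h; simp [pvQ_false_of_ge values j hge]
        · simp [pvQ_false_of_ge values j (le_trans hge (hpw'.1 j h))]
      simp [hnil]
    · have hlt : i < (values.length : Int) := by
        by_contra hge
        have : PySem.List.pyGet? values i = none := by
          apply (PySem.List.pyGet?_eq_none_iff (xs := values) (i := i)).mpr
          simp [PySem.Raise.InRange]
          omega
        simp [this] at hg
      have hq : pvQ values i = (v == "1") := by
        simp [pvQ, hg, hlt]
      simp only []
      by_cases hv : v = "1"
      · subst hv
        have hone : (("1" : String) == "1") = true := rfl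
        rw [hone, if_pos rfl, ih (acc ++ [i]) hpw'.2 (fun j hj => hnn j (by simp [hj]))]
        rw [List.filter_cons, hq]
        simp
      · have hvb : (v == "1") = false := by simp [hv]
        rw [hvb, if_neg (by simp)]
        rw [ih acc hpw'.2 (fun j hj => hnn j (by simp [hj]))]
        rw [List.filter_cons, hq, hvb]
        simp

lemma pvBLoop_eq (values : List String) :
    ∀ (idxs : List Int) (count : Int) (ks : List String),
      pvBLoop values idxs count ks =
        (count + ((idxs.filter (pvQ values)).length : Int),
         ks ++ (idxs.filter (fun i => !(pvQ values i))).map pvCoord) := by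
  intro idxs
  induction idxs with
  | nil => intro count ks; simp [pvBLoop]
  | cons i rest ih =>
    intro count ks
    rw [pvBLoop]
    by_cases hq : pvQ values i = true
    · rw [if_pos (by simpa [pvQ] using hq), ih]
      rw [List.filter_cons, List.filter_cons, hq]
      simp
      omega
    · have hq' : pvQ values i = false := by simpa using hq
      have hc : (decide (i < (values.length : Int)) && (PySem.List.pyGet? values i == some "1")) = false := hq'
      rw [if_neg (by simp [hc]), ih]
      rw [List.filter_cons, List.filter_cons, hq']
      simp

lemma pvMem_filter_q (values : List String) (i : Int)
    (hi : i ∈ PySem.List.pyRange 0 42 1) :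
    ((PySem.List.pyRange 0 42 1).filter (pvQ values)).contains i = pvQ values i := by
  by_cases hq : pvQ values i = true
  · simp [List.mem_filter, hi, hq]
  · simp only [Bool.not_eq_true] at hq
    simp [List.mem_filter, hq]

lemma pvCore (values : List String) :
    (PySem.Int.toStr (((pvALoop values (PySem.List.pyRange 0 42 1) []).length : Int)) ++ "/" ++ PySem.Int.toStr 42,
     PySem.Str.join ", " (((PySem.List.pyRange 0 42 1).filter
        (fun i => !((pvALoop values (PySem.List.pyRange 0 42 1) []).contains i))).map (fun i => pvCoord i)))
    = (PySem.Int.toStr (pvBLoop values (PySem.List.pyRange 0 42 1) 0 []).1 ++ "/42",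
       PySem.Str.join ", " (pvBLoop values (PySem.List.pyRange 0 42 1) 0 []).2) := by
  have hA := pvALoop_eq values (PySem.List.pyRange 0 42 1) []
    ((PySem.List.pairwise_lt_pyRange_one 0 42).imp le_of_lt)
    (fun i hi => (PySem.List.mem_pyRange_one.mp hi).1)
  have hB := pvBLoop_eq values (PySem.List.pyRange 0 42 1) 0 []
  simp only [List.nil_append] at hA hB
  have hfail : (PySem.List.pyRange 0 42 1).filter
      (fun i => !((pvALoop values (PySem.List.pyRange 0 42 1) []).contains i)) =
      (PySem.List.pyRange 0 42 1).filter (fun i => !(pvQ values i)) := by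
    apply List.filter_congr
    intro i hi
    rw [hA, pvMem_filter_q values i hi]
  rw [hfail, hA, hB]
  simp only [zero_add]
  refine Prod.ext ?_ (by simp)
  show PySem.Int.toStr _ ++ "/" ++ PySem.Int.toStr 42 = PySem.Int.toStr _ ++ "/42"
  have h42 : ("/" : String) ++ PySem.Int.toStr 42 = "/42" := by decide
  rw [← h42, ← String.append_assoc]

-- ===== VERDICT (by name: the statement is the Claim_ definition above) =====
theorem analiz_et_kalip_matrisi_spec : Claim_equal_analiz_et_kalip_matrisi := by
  intro dizi _
  unfold Spec_analiz_et_kalip_matrisi analiz_et_kalip_matrisi analiz_et_kalip_matrisi_alt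
  exact pvCore ((PySem.Str.split? dizi ",").getD [])
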